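-- pv_equiv track=rewrite | github.com/albeano1/ELMSLAB | ocr_processor.py | _classify_statement_type
-- ===== SOURCE A (Python) =====
-- def _classify_statement_type(sentence: str) -> str:
--     """Classify the type of logical statement."""
--     sentence_lower = sentence.lower()
--
--     # Question
--     if sentence.endswith('?') or any(word in sentence_lower for word in ['who', 'what', 'where', 'when', 'why', 'how']):
--         return 'question'
--
--     # Universal statement
--     elif any(word in sentence_lower for word in ['all', 'every', 'each', 'any']):
--         return 'universal'
--
--     # Existential statement
--     elif any(word in sentence_lower for word in ['some', 'there exists', 'there is']):
--         return 'existential'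
--
--     # Conditional statement
--     elif any(word in sentence_lower for word in ['if', 'when', 'unless', 'provided that']):
--         return 'conditional'
--
--     # Negation
--     elif any(word in sentence_lower for word in ['not', 'no', 'never', 'none']):
--         return 'negation'
--
--     # Factual statement
--     else:
--         return 'factual'
-- ===== SOURCE B (Python) =====
-- # Single-pass scan: at each position, find keywords starting there and keep the
-- # lowest rank seen; rank -> category.  'when' carries rank 0 only: whenever it
-- # occurs the question branch wins anyway, so its redundant conditional listing
-- # in A never decides the answer.
-- _KEYWORD_RANK = {
--     'who': 0, 'what': 0, 'where': 0, 'when': 0, 'why': 0, 'how': 0,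
--     'all': 1, 'every': 1, 'each': 1, 'any': 1,
--     'some': 2, 'there exists': 2, 'there is': 2,
--     'if': 3, 'unless': 3, 'provided that': 3,
--     'not': 4, 'no': 4, 'never': 4, 'none': 4,
-- }
-- _RANK_NAME = ['question', 'universal', 'existential', 'conditional', 'negation', 'factual']
--
--
-- def _classify_statement_type(sentence: str) -> str:
--     """Classify the type of logical statement."""
--     if sentence.endswith('?'):
--         return 'question'
--     s = sentence.lower()
--     best = 5
--     for i in range(len(s)):
--         for kw, rank in _KEYWORD_RANK.items():
--             if rank < best and s.startswith(kw, i):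
--                 best = rank
--     return _RANK_NAME[best]
-- ===== Notes on version B (the rewrite author's own statement) =====
-- stated objective: alternative
-- what changed: Replaces the category-by-category substring membership tests with a single position-by-position scan of the lowered sentence that keeps the minimum rank of any keyword starting at each position and then maps that rank to a category name; the keyword shared between the question and conditional groups is carried at its question rank only, where it always decides.
import Mathlib
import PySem

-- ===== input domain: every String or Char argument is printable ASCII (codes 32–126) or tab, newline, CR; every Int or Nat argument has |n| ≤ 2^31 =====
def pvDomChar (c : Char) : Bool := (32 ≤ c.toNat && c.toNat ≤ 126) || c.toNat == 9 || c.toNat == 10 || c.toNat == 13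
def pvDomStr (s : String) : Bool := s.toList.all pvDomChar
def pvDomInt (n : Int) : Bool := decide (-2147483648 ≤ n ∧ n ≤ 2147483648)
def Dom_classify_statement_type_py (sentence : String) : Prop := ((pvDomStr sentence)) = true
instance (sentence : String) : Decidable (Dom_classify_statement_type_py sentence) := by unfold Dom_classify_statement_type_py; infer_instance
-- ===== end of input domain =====

-- B replaces A's category-by-category substring tests with one position-by-position scan
-- keeping the minimum keyword rank (alternative traversal order; same behaviour).


-- ===== PORT A =====
def classify_statement_type_py (sentence : String) : String :=
  let sentence_lower := PySem.Str.lower sentence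
  if PySem.Str.endswith sentence "?"
      || (["who", "what", "where", "when", "why", "how"].any fun word => PySem.Str.isIn word sentence_lower) then
    "question"
  else if ["all", "every", "each", "any"].any (fun word => PySem.Str.isIn word sentence_lower) then
    "universal"
  else if ["some", "there exists", "there is"].any (fun word => PySem.Str.isIn word sentence_lower) then
    "existential"
  else if ["if", "when", "unless", "provided that"].any (fun word => PySem.Str.isIn word sentence_lower) then
    "conditional"
  else if ["not", "no", "never", "none"].any (fun word => PySem.Str.isIn word sentence_lower) then
    "negation"
  else
    "factual"

-- ===== PORT B =====
def pvKeywordRank : List (String × Nat) :=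
  [("who", 0), ("what", 0), ("where", 0), ("when", 0), ("why", 0), ("how", 0),
   ("all", 1), ("every", 1), ("each", 1), ("any", 1),
   ("some", 2), ("there exists", 2), ("there is", 2),
   ("if", 3), ("unless", 3), ("provided that", 3),
   ("not", 4), ("no", 4), ("never", 4), ("none", 4)]

def pvRankName : List String :=
  ["question", "universal", "existential", "conditional", "negation", "factual"]

-- s.startswith(kw, i) with 0 ≤ i < len(s) is ported exactly as a prefix test on drop i;
-- _RANK_NAME[best] with best ≤ 5 is List.getD (the default is unreachable).
def classify_statement_type_py_alt (sentence : String) : String :=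
  if PySem.Str.endswith sentence "?" then
    "question"
  else
    let s := PySem.Str.lower sentence
    let best := (PySem.List.pyRange 0 (PySem.Str.len s) 1).foldl
      (fun best i => pvKeywordRank.foldl
        (fun b kw => if kw.2 < b && PySem.Chars.startswith (s.toList.drop i.toNat) kw.1.toList then kw.2 else b)
        best) 5
    pvRankName.getD best "factual"

-- ===== PRECONDITION & SPEC =====
def Spec_classify_statement_type_py (sentence : String) (out : String) : Prop := out = classify_statement_type_py_alt sentence
instance (sentence : String) (out : String) : Decidable (Spec_classify_statement_type_py sentence out) := by unfold Spec_classify_statement_type_py; infer_instance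

-- ===== CLAIM =====
def Claim_equal_classify_statement_type_py : Prop := ∀ (sentence : String), Dom_classify_statement_type_py sentence → Spec_classify_statement_type_py sentence (classify_statement_type_py sentence)

-- ===== LEMMAS AND PROOFS =====

-- the guarded running-minimum step is a min over the matched elements
theorem pv_foldl_if_min {α : Type} (p : α → Bool) (f : α → Nat) (l : List α) :
    ∀ b : Nat, l.foldl (fun b x => if f x < b && p x then f x else b) b
      = ((l.filter p).map f).foldl min b := by
  induction l with
  | nil => intro b; rfl
  | cons a t ih =>
    intro b
    by_cases hp : p a = true
    · simp only [List.foldl_cons, List.filter_cons, hp, if_pos, List.map_cons, ih]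
      congr 1
      simp only [Bool.and_true]
      split_ifs with h
      · simp at h; omega
      · simp at h; omega
    · simp only [List.foldl_cons, List.filter_cons, hp, ih]
      simp

theorem pv_foldl_min_flat {α : Type} (g : α → List Nat) (l : List α) :
    ∀ b : Nat, l.foldl (fun b i => (g i).foldl min b) b = (l.flatMap g).foldl min b := by
  induction l with
  | nil => intro b; rfl
  | cons a t ih => intro b; simp [List.flatMap_cons, List.foldl_append, ih]

-- the multiset of ranks B's scan ever sees
def pvK (sl : List Char) : List Nat :=
  (PySem.List.pyRange 0 (sl.length : Int) 1).flatMap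
    (fun i => (pvKeywordRank.filter (fun kw => PySem.Chars.startswith (sl.drop i.toNat) kw.1.toList)).map (·.2))

theorem pv_mem_K (sl : List Char) (r : Nat) :
    r ∈ pvK sl ↔ ∃ kw ∈ pvKeywordRank, kw.2 = r ∧ PySem.Chars.isIn kw.1.toList sl = true := by
  have hne : ∀ kw ∈ pvKeywordRank, kw.1.toList ≠ [] := by decide
  constructor
  · intro h
    rw [pvK, List.mem_flatMap] at h
    obtain ⟨i, hi, hmem⟩ := h
    rw [List.mem_map] at hmem
    obtain ⟨kw, hkw, rfl⟩ := hmem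
    rw [List.mem_filter] at hkw
    exact ⟨kw, hkw.1, rfl,
      (PySem.Chars.exists_prefix_drop_iff_isIn _ _).1 ⟨i.toNat, (PySem.Chars.startswith_iff _ _).1 hkw.2⟩⟩
  · rintro ⟨kw, hkw, rfl, hin⟩
    obtain ⟨j, hj⟩ := (PySem.Chars.exists_prefix_drop_iff_isIn _ _).2 hin
    have hjlt : j < sl.length := by
      by_contra hge
      rw [Nat.not_lt] at hge
      rw [List.drop_eq_nil_of_le hge] at hj
      exact hne kw hkw (List.prefix_nil.mp hj)
    refine List.mem_flatMap.2 ⟨(j : Int), ?_, ?_⟩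
    · rw [PySem.List.mem_pyRange_one]
      exact ⟨by positivity, by exact_mod_cast hjlt⟩
    · exact List.mem_map.2 ⟨kw, List.mem_filter.2
        ⟨hkw, (PySem.Chars.startswith_iff _ _).2 (by simpa using hj)⟩, rfl⟩

-- ===== VERDICT =====
theorem classify_statement_type_py_spec : Claim_equal_classify_statement_type_py := by
  intro sentence _
  unfold Spec_classify_statement_type_py classify_statement_type_py classify_statement_type_py_alt
  by_cases hq : PySem.Str.endswith sentence "?" = true
  · have hq' : PySem.Chars.endswith sentence.toList ['?'] = true := by simpa using hq
    simp [hq']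
  · rw [Bool.not_eq_true] at hq
    simp only [hq, Bool.false_or, Bool.false_eq_true, if_false]
    set s := PySem.Str.lower sentence with hs
    have hfold : (PySem.List.pyRange 0 (PySem.Str.len s) 1).foldl
        (fun best i => pvKeywordRank.foldl
          (fun b kw => if kw.2 < b && PySem.Chars.startswith (s.toList.drop i.toNat) kw.1.toList then kw.2 else b)
          best) 5 = (pvK s.toList).foldl min 5 := by
      have h1 : (fun (best : Nat) (i : Int) => pvKeywordRank.foldl
          (fun b kw => if kw.2 < b && PySem.Chars.startswith (s.toList.drop i.toNat) kw.1.toList then kw.2 else b) best)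
          = fun best i => ((pvKeywordRank.filter
              (fun kw => PySem.Chars.startswith (s.toList.drop i.toNat) kw.1.toList)).map (·.2)).foldl min best := by
        funext best i
        exact pv_foldl_if_min _ _ _ best
      rw [h1, pv_foldl_min_flat, pvK]
      simp
    rw [hfold]
    set m := (pvK s.toList).foldl min 5 with hm
    have hle5 : m ≤ 5 := (PySem.List.foldl_min_le _ _).1
    have hle : ∀ y ∈ pvK s.toList, m ≤ y := (PySem.List.foldl_min_le _ _).2
    have hmem : m = 5 ∨ m ∈ pvK s.toList := PySem.List.foldl_min_mem _ _
    have hpres : ∀ r : Nat, (∃ kw ∈ pvKeywordRank, kw.2 = r ∧ PySem.Chars.isIn kw.1.toList s.toList = true) → m ≤ r :=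
      fun r h => hle r ((pv_mem_K _ _).2 h)
    have habs : ∀ r : Nat, r ≠ 5 →
        ¬(∃ kw ∈ pvKeywordRank, kw.2 = r ∧ PySem.Chars.isIn kw.1.toList s.toList = true) → m ≠ r := by
      intro r hr5 h hmr
      rcases hmem with h5 | hK
      · exact hr5 (hmr ▸ h5)
      · exact h ((pv_mem_K _ _).1 (hmr ▸ hK))
    by_cases h0 : (["who", "what", "where", "when", "why", "how"].any fun word => PySem.Str.isIn word s) = true
    · rcases List.any_eq_true.mp h0 with ⟨w, hw, hin⟩
      have htab : ∀ w ∈ (["who", "what", "where", "when", "why", "how"] : List String),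
          ((w, 0) : String × Nat) ∈ pvKeywordRank := by decide
      have : m = 0 := Nat.le_zero.mp (hpres 0 ⟨(w, 0), htab w hw, rfl, by simpa using hin⟩)
      rw [if_pos h0, this]
      rfl
    · have hn0 : m ≠ 0 := by
        refine habs 0 (by omega) ?_
        rintro ⟨kw, hkw, hr, hin⟩
        have hcase : ∀ kw ∈ pvKeywordRank, kw.2 = 0 →
            kw.1 ∈ (["who", "what", "where", "when", "why", "how"] : List String) := by decide
        exact h0 (List.any_eq_true.mpr ⟨kw.1, hcase kw hkw hr, by simpa using hin⟩)
      have hnwhen : ¬ PySem.Chars.isIn "when".toList s.toList = true := by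
        intro h
        exact h0 (List.any_eq_true.mpr ⟨"when", by decide, by simpa using h⟩)
      rw [if_neg h0]
      by_cases h1 : (["all", "every", "each", "any"].any fun word => PySem.Str.isIn word s) = true
      · rcases List.any_eq_true.mp h1 with ⟨w, hw, hin⟩
        have htab : ∀ w ∈ (["all", "every", "each", "any"] : List String),
            ((w, 1) : String × Nat) ∈ pvKeywordRank := by decide
        have hle1 : m ≤ 1 := hpres 1 ⟨(w, 1), htab w hw, rfl, by simpa using hin⟩
        have : m = 1 := by omega
        rw [if_pos h1, this]
        rfl
      · have hn1 : m ≠ 1 := by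
          refine habs 1 (by omega) ?_
          rintro ⟨kw, hkw, hr, hin⟩
          have hcase : ∀ kw ∈ pvKeywordRank, kw.2 = 1 →
              kw.1 ∈ (["all", "every", "each", "any"] : List String) := by decide
          exact h1 (List.any_eq_true.mpr ⟨kw.1, hcase kw hkw hr, by simpa using hin⟩)
        rw [if_neg h1]
        by_cases h2 : (["some", "there exists", "there is"].any fun word => PySem.Str.isIn word s) = true
        · rcases List.any_eq_true.mp h2 with ⟨w, hw, hin⟩
          have htab : ∀ w ∈ (["some", "there exists", "there is"] : List String),
              ((w, 2) : String × Nat) ∈ pvKeywordRank := by decide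
          have hle2 : m ≤ 2 := hpres 2 ⟨(w, 2), htab w hw, rfl, by simpa using hin⟩
          have : m = 2 := by omega
          rw [if_pos h2, this]
          rfl
        · have hn2 : m ≠ 2 := by
            refine habs 2 (by omega) ?_
            rintro ⟨kw, hkw, hr, hin⟩
            have hcase : ∀ kw ∈ pvKeywordRank, kw.2 = 2 →
                kw.1 ∈ (["some", "there exists", "there is"] : List String) := by decide
            exact h2 (List.any_eq_true.mpr ⟨kw.1, hcase kw hkw hr, by simpa using hin⟩)
          rw [if_neg h2]
          by_cases h3 : (["if", "when", "unless", "provided that"].any fun word => PySem.Str.isIn word s) = true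
          · rcases List.any_eq_true.mp h3 with ⟨w, hw, hin⟩
            have htab : ∀ w ∈ (["if", "when", "unless", "provided that"] : List String),
                w = "when" ∨ ((w, 3) : String × Nat) ∈ pvKeywordRank := by decide
            rcases htab w hw with rfl | hmem3
            · exact absurd (by simpa using hin) hnwhen
            · have hle3 : m ≤ 3 := hpres 3 ⟨(w, 3), hmem3, rfl, by simpa using hin⟩
              have : m = 3 := by omega
              rw [if_pos h3, this]
              rfl
          · have hn3 : m ≠ 3 := by
              refine habs 3 (by omega) ?_
              rintro ⟨kw, hkw, hr, hin⟩
              have hcase : ∀ kw ∈ pvKeywordRank, kw.2 = 3 →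
                  kw.1 ∈ (["if", "when", "unless", "provided that"] : List String) := by decide
              exact h3 (List.any_eq_true.mpr ⟨kw.1, hcase kw hkw hr, by simpa using hin⟩)
            rw [if_neg h3]
            by_cases h4 : (["not", "no", "never", "none"].any fun word => PySem.Str.isIn word s) = true
            · rcases List.any_eq_true.mp h4 with ⟨w, hw, hin⟩
              have htab : ∀ w ∈ (["not", "no", "never", "none"] : List String),
                  ((w, 4) : String × Nat) ∈ pvKeywordRank := by decide
              have hle4 : m ≤ 4 := hpres 4 ⟨(w, 4), htab w hw, rfl, by simpa using hin⟩
              have : m = 4 := by omega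
              rw [if_pos h4, this]
              rfl
            · have hn4 : m ≠ 4 := by
                refine habs 4 (by omega) ?_
                rintro ⟨kw, hkw, hr, hin⟩
                have hcase : ∀ kw ∈ pvKeywordRank, kw.2 = 4 →
                    kw.1 ∈ (["not", "no", "never", "none"] : List String) := by decide
                exact h4 (List.any_eq_true.mpr ⟨kw.1, hcase kw hkw hr, by simpa using hin⟩)
              rw [if_neg h4]
              have : m = 5 := by omega
              rw [this]
              rfl
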